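-- pv_equiv track=rewrite | github.com/uvsq22102103/QR-Code | projet_elie.py | trad_ascii
-- ===== SOURCE A (Python) =====
-- def trad_ascii(m):
--     """ renvoie la lettre corespondant au  8 bits de donnés """
--     message = ""
--     for i in range(0, len(m)-1, 2):
--         code_bi = ""
--         for j in range(4):
--             code_bi += str(m[i][j])
--         for j in range(4):
--             code_bi += str(m[i+1][j])
--         code_num = int(code_bi, 2)
--         message += chr(code_num)
--     return message
-- ===== SOURCE B (Python) =====
-- # 16-entry nibble lookup table, built once: (b3, b2, b1, b0) -> value 0..15
-- _NIB = {}
-- for _v in range(16):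
--     _NIB[(_v >> 3, _v >> 2 & 1, _v >> 1 & 1, _v & 1)] = _v
--
--
-- def trad_ascii(m):
--     """ renvoie la lettre corespondant au  8 bits de donnes """
--     if len(m) < 2:
--         return ""
--     return chr(16 * _NIB[tuple(m[0][:4])] + _NIB[tuple(m[1][:4])]) + trad_ascii(m[2:])
-- ===== Notes on version B (the rewrite author's own statement) =====
-- stated objective: alternative
-- what changed: B replaces A's index loop that builds a binary string per character and parses it with int(s,2) by a recursion that consumes two rows at a time and decodes each 4-bit half with a single lookup in a 16-entry nibble table built once, so no per-bit work happens while translating.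
-- outside the precondition, e.g. on trad_ascii([[10, 0, 0, 0], [0, 0, 0, 0]]): A returns 'Ā', B raises KeyError
import Mathlib
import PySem

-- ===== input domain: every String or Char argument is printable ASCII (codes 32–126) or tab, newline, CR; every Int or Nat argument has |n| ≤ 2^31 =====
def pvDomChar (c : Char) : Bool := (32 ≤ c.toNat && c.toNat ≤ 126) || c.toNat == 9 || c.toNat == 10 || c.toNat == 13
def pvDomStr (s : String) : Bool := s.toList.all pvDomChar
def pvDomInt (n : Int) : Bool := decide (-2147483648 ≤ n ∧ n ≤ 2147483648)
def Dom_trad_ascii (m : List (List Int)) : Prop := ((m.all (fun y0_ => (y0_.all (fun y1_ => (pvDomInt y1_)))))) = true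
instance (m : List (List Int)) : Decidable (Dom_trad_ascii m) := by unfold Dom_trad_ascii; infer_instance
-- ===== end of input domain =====

-- B replaces A's binary-string-then-int(s,2) index loop by a recursion over row pairs that
-- decodes each 4-bit half with one lookup in a 16-entry nibble table built once; same cost.


-- ===== PORT A =====
-- loop body of A for the pair of rows m[i], m[i+1]: build code_bi by string concatenation
-- of str(m[i][j]) / str(m[i+1][j]) for j in range(4), then int(code_bi, 2), then chr
def tradA_char (r1 r2 : List Int) : Char :=
  let code_bi : String :=
    (PySem.List.pyRange 0 4 1).foldl
      (fun s j => s ++ PySem.Int.toStr ((PySem.List.pyGet? r1 j).getD 0)) ""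
  let code_bi : String :=
    (PySem.List.pyRange 0 4 1).foldl
      (fun s j => s ++ PySem.Int.toStr ((PySem.List.pyGet? r2 j).getD 0)) code_bi
  let code_num : Int := (PySem.Int.ofStrBase? code_bi 2).getD 0  -- int(code_bi, 2); none (ValueError) excluded by Pre_
  Char.ofNat code_num.toNat                                       -- chr(code_num)

def trad_ascii (m : List (List Int)) : String :=
  (PySem.List.pyRange 0 ((m.length : Int) - 1) 2).foldl
    (fun message i =>
      message ++ String.singleton
        (tradA_char ((PySem.List.pyGet? m i).getD []) ((PySem.List.pyGet? m (i + 1)).getD [])))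
    ""

-- ===== PORT B =====
-- the module-level table _NIB: for _v in range(16): _NIB[(_v>>3, _v>>2&1, _v>>1&1, _v&1)] = _v
-- (tuple keys are ported as List Int keys)
def nibTable : PySem.Dict (List Int) Int :=
  (PySem.List.pyRange 0 16 1).foldl
    (fun d v =>
      d.insert [PySem.Int.floordiv v 8, PySem.Int.mod (PySem.Int.floordiv v 4) 2,
                PySem.Int.mod (PySem.Int.floordiv v 2) 2, PySem.Int.mod v 2] v)
    PySem.Dict.empty

-- chr(16 * _NIB[tuple(m[0][:4])] + _NIB[tuple(m[1][:4])]); a missing key (KeyError) is excluded by Pre_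
def tradB_char (r1 r2 : List Int) : Char :=
  Char.ofNat
    ((16 * (nibTable.get? (PySem.List.slice r1 none (some 4))).getD 0
        + (nibTable.get? (PySem.List.slice r2 none (some 4))).getD 0).toNat)

def trad_ascii_alt : List (List Int) → String
  | [] => ""                       -- len(m) < 2
  | [_] => ""                      -- len(m) < 2
  | hi :: lo :: rest => String.singleton (tradB_char hi lo) ++ trad_ascii_alt rest

-- ===== PRECONDITION & SPEC =====
-- Pre_ admits exactly the inputs where every row the loop reads has at least 4 entries, each 0 or 1.
-- It excludes inputs where A raises (a used row shorter than 4 → IndexError; a used entry whose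
-- decimal digits are not all binary digits → ValueError in int(code_bi, 2)), and the accidental case
-- where A still returns because a multi-digit entry such as 10 is string-concatenated into the binary
-- code, an artefact of A's string building on which B raises KeyError.
def Pre_trad_ascii (m : List (List Int)) : Prop :=
  ∀ r ∈ m.take (2 * (m.length / 2)), 4 ≤ r.length ∧ ∀ b ∈ r.take 4, b = 0 ∨ b = 1
instance (m : List (List Int)) : Decidable (Pre_trad_ascii m) := by unfold Pre_trad_ascii; infer_instance

def pvWitness_trad_ascii : List (List Int) := [[0, 1, 0, 0], [0, 0, 0, 1]]

def Spec_trad_ascii (m : List (List Int)) (out : String) : Prop := out = trad_ascii_alt m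
instance (m : List (List Int)) (out : String) : Decidable (Spec_trad_ascii m out) := by unfold Spec_trad_ascii; infer_instance

-- ===== CLAIM (what is proved, stated in full; the proofs are below) =====
def Claim_equal_trad_ascii : Prop := ∀ (m : List (List Int)), Dom_trad_ascii m → Pre_trad_ascii m → Spec_trad_ascii m (trad_ascii m)

-- ===== LEMMAS AND PROOFS =====

-- building a string by repeated `++ singleton` is ofList of the mapped list
theorem foldl_append_singleton_str {α : Type} (L : List α) (f : α → Char) (acc : String) :
    L.foldl (fun s x => s ++ String.singleton (f x)) acc = acc ++ String.ofList (L.map f) := by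
  induction L generalizing acc with
  | nil => simp
  | cons x xs ih =>
      rw [List.foldl_cons, ih, List.map_cons]
      apply String.toList_injective
      simp

-- A as ofList of a map over its index range
theorem trad_ascii_eq_ofList (m : List (List Int)) :
    trad_ascii m = String.ofList ((PySem.List.pyRange 0 ((m.length : Int) - 1) 2).map
      (fun i => tradA_char ((PySem.List.pyGet? m i).getD []) ((PySem.List.pyGet? m (i + 1)).getD []))) := by
  unfold trad_ascii
  rw [foldl_append_singleton_str, String.empty_append]

-- A strips one pair of rows per step
theorem trad_ascii_cons_cons (r1 r2 : List Int) (rest : List (List Int)) :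
    trad_ascii (r1 :: r2 :: rest) = String.singleton (tradA_char r1 r2) ++ trad_ascii rest := by
  rw [trad_ascii_eq_ofList, trad_ascii_eq_ofList]
  have hstep : (0:Int) < 2 := by norm_num
  rw [PySem.List.pyRange_of_pos 0 (((r1 :: r2 :: rest).length : Int) - 1) hstep,
      PySem.List.pyRange_of_pos 0 ((rest.length : Int) - 1) hstep]
  have hN : (if (0:Int) < ((r1 :: r2 :: rest).length : Int) - 1 then
        ((((r1 :: r2 :: rest).length : Int) - 1 - 0 + 2 - 1) / 2).toNat else 0)
      = (if (0:Int) < ((rest.length : Int) - 1) then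
        ((((rest.length : Int) - 1 - 0 + 2 - 1) / 2).toNat) else 0) + 1 := by
    simp only [List.length_cons]
    split_ifs <;> omega
  rw [hN, List.range_succ_eq_map, List.map_cons, List.map_cons, List.map_map, List.map_map]
  apply String.toList_injective
  simp only [String.toList_ofList, String.toList_append, String.toList_singleton,
    List.singleton_append, List.cons.injEq]
  constructor
  · show tradA_char _ _ = tradA_char r1 r2
    congr 1 <;> simp [PySem.List.pyGet?, PySem.List.pyIdx?] <;>
      rw [if_pos (by positivity)] <;> simp
  · rw [List.map_map]
    apply List.map_congr_left
    intro k _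
    simp only [Function.comp_apply]
    have e1 : (0:Int) + 2 * (Nat.succ k : Nat) = ((2 * k + 2 : Nat) : Int) := by push_cast; ring
    have e2 : (0:Int) + 2 * (k : Nat) = ((2 * k : Nat) : Int) := by push_cast; ring
    rw [e1, e2, PySem.List.pyGet?_natCast, PySem.List.pyGet?_natCast,
        show ((2 * k + 2 : Nat) : Int) + 1 = ((2 * k + 3 : Nat) : Int) by push_cast; ring,
        show ((2 * k : Nat) : Int) + 1 = ((2 * k + 1 : Nat) : Int) by push_cast; ring,
        PySem.List.pyGet?_natCast, PySem.List.pyGet?_natCast]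
    congr 1

theorem trad_ascii_nil : trad_ascii [] = "" := by decide

theorem trad_ascii_single (r : List Int) : trad_ascii [r] = "" := by
  rw [trad_ascii_eq_ofList]
  simp [PySem.List.pyRange]

-- the unread tails of the two rows do not matter (port A side)
theorem tradA_char_take (a b c d : Int) (t : List Int) (e f g h : Int) (u : List Int) :
    tradA_char (a :: b :: c :: d :: t) (e :: f :: g :: h :: u) = tradA_char [a, b, c, d] [e, f, g, h] := by
  simp [tradA_char, PySem.List.pyRange_one, List.range_succ]
  simp only [show (1:Int) = ((1:Nat):Int) by norm_num, show (2:Int) = ((2:Nat):Int) by norm_num,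
    show (3:Int) = ((3:Nat):Int) by norm_num, PySem.List.pyGet?_natCast]
  simp

-- the unread tails of the two rows do not matter (port B side)
theorem tradB_char_take (a b c d : Int) (t : List Int) (e f g h : Int) (u : List Int) :
    tradB_char (a :: b :: c :: d :: t) (e :: f :: g :: h :: u) = tradB_char [a, b, c, d] [e, f, g, h] := by
  simp only [tradB_char, show (4:Int) = ((4:Nat):Int) by norm_num, PySem.List.slice_to_natCast]
  simp

-- on 8 concrete binary digits, parsing the concatenated decimal strings in base 2
-- is the table decoding of the two nibbles (256 cases)
theorem tradA_char_eq_tradB_char_bits (a b c d e f g h : Int)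
    (ha : a = 0 ∨ a = 1) (hb : b = 0 ∨ b = 1) (hc : c = 0 ∨ c = 1) (hd : d = 0 ∨ d = 1)
    (he : e = 0 ∨ e = 1) (hf : f = 0 ∨ f = 1) (hg : g = 0 ∨ g = 1) (hh : h = 0 ∨ h = 1) :
    tradA_char [a, b, c, d] [e, f, g, h] = tradB_char [a, b, c, d] [e, f, g, h] := by
  rcases ha with rfl | rfl <;> rcases hb with rfl | rfl <;> rcases hc with rfl | rfl <;>
  rcases hd with rfl | rfl <;> rcases he with rfl | rfl <;> rcases hf with rfl | rfl <;>
  rcases hg with rfl | rfl <;> rcases hh with rfl | rfl <;> decide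

-- the per-pair computations agree on binary rows of length ≥ 4
theorem tradA_char_eq_tradB_char (r1 r2 : List Int)
    (h1 : 4 ≤ r1.length) (h2 : 4 ≤ r2.length)
    (hb1 : ∀ b ∈ r1.take 4, b = 0 ∨ b = 1) (hb2 : ∀ b ∈ r2.take 4, b = 0 ∨ b = 1) :
    tradA_char r1 r2 = tradB_char r1 r2 := by
  obtain ⟨a, b, c, d, t, rfl⟩ : ∃ a b c d t, r1 = a :: b :: c :: d :: t := by
    rcases r1 with _ | ⟨a, _ | ⟨b, _ | ⟨c, _ | ⟨d, t⟩⟩⟩⟩ <;> simp at h1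
    exact ⟨a, b, c, d, t, rfl⟩
  obtain ⟨e, f, g, h, u, rfl⟩ : ∃ e f g h u, r2 = e :: f :: g :: h :: u := by
    rcases r2 with _ | ⟨e, _ | ⟨f, _ | ⟨g, _ | ⟨h, u⟩⟩⟩⟩ <;> simp at h2
    exact ⟨e, f, g, h, u, rfl⟩
  rw [tradA_char_take, tradB_char_take]
  exact tradA_char_eq_tradB_char_bits a b c d e f g h
    (hb1 a (by simp)) (hb1 b (by simp)) (hb1 c (by simp)) (hb1 d (by simp))
    (hb2 e (by simp)) (hb2 f (by simp)) (hb2 g (by simp)) (hb2 h (by simp))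

-- Pre_ passes to the tail after one pair
theorem pre_tail (r1 r2 : List Int) (rest : List (List Int))
    (h : Pre_trad_ascii (r1 :: r2 :: rest)) : Pre_trad_ascii rest := by
  intro r hr
  apply h r
  simp only [List.length_cons]
  have : (rest.length + 1 + 1) / 2 = rest.length / 2 + 1 := by omega
  rw [this, Nat.mul_add, Nat.mul_one, List.take_succ_cons, List.take_succ_cons]
  exact List.mem_cons_of_mem _ (List.mem_cons_of_mem _ hr)

theorem pre_head (r1 r2 : List Int) (rest : List (List Int))
    (h : Pre_trad_ascii (r1 :: r2 :: rest)) :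
    (4 ≤ r1.length ∧ ∀ b ∈ r1.take 4, b = 0 ∨ b = 1) ∧
    (4 ≤ r2.length ∧ ∀ b ∈ r2.take 4, b = 0 ∨ b = 1) := by
  have hform : ((r1 :: r2 :: rest).take (2 * ((r1 :: r2 :: rest).length / 2)))
      = r1 :: r2 :: rest.take (2 * (rest.length / 2)) := by
    simp only [List.length_cons]
    have : (rest.length + 1 + 1) / 2 = rest.length / 2 + 1 := by omega
    rw [this, Nat.mul_add, Nat.mul_one, List.take_succ_cons, List.take_succ_cons]
  refine ⟨h r1 ?_, h r2 ?_⟩ <;> rw [hform] <;> simp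

theorem trad_ascii_eq_alt (m : List (List Int)) (hpre : Pre_trad_ascii m) :
    trad_ascii m = trad_ascii_alt m := by
  match m with
  | [] => rw [trad_ascii_nil]; rfl
  | [r] => rw [trad_ascii_single]; rfl
  | r1 :: r2 :: rest =>
      obtain ⟨⟨h1, hb1⟩, h2, hb2⟩ := pre_head r1 r2 rest hpre
      rw [trad_ascii_cons_cons, trad_ascii_eq_alt rest (pre_tail r1 r2 rest hpre),
          tradA_char_eq_tradB_char r1 r2 h1 h2 hb1 hb2]
      rfl

-- ===== VERDICT (by name: the statement is the Claim_ definition above) =====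
theorem trad_ascii_spec : Claim_equal_trad_ascii := by
  intro m _hdom hpre
  exact trad_ascii_eq_alt m hpre
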